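-- pv_equiv track=rewrite | github.com/gloryi/agile_stocks_analyzer | _neuralDA.py | best_direction
-- ===== SOURCE A (Python) =====
-- LONG = 1
--
-- SHORT = 0
--
-- def best_direction(c_prices):
--
--     best_delta = 0
--     direction = LONG
--
--     total_bearish = 0
--     total_bullish = 0
--
--     for first_candle in range(5):
--         for last_candle in range(first_candle, len(c_prices)):
--
--             if first_candle == last_candle:
--                 continue
--
--             c1 = c_prices[first_candle]
--             c2 = c_prices[last_candle]
--
--             delta = c2 - c1
--
--             if delta > 0:
--                 total_bullish += delta
--
--             elif delta < 0:
--                 total_bearish += abs(delta)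
--
--     direction = LONG if total_bullish > total_bearish else SHORT
--
--     return direction
-- ===== SOURCE B (Python) =====
-- LONG = 1
--
-- SHORT = 0
--
-- def best_direction(c_prices):
--     # Net signed delta over all (first, last) pairs via prefix sums:
--     # total_bullish - total_bearish == sum of (c[last] - c[first]), so
--     # compare that net sum with 0 instead of keeping two buckets.
--     n = len(c_prices)
--     total = sum(c_prices)
--     prefix = 0
--     net = 0
--     for first in range(min(5, n)):
--         p = c_prices[first]
--         prefix += p
--         net += (total - prefix) - (n - 1 - first) * p
--     return LONG if net > 0 else SHORT
-- ===== Notes on version B (the rewrite author's own statement) =====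
-- stated objective: faster
-- what changed: Replaced the nested pair enumeration with two buckets by a single linear sweep over at most 5 prefix positions using the total and running prefix sum, deciding LONG by the sign of the net signed delta.
import Mathlib
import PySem

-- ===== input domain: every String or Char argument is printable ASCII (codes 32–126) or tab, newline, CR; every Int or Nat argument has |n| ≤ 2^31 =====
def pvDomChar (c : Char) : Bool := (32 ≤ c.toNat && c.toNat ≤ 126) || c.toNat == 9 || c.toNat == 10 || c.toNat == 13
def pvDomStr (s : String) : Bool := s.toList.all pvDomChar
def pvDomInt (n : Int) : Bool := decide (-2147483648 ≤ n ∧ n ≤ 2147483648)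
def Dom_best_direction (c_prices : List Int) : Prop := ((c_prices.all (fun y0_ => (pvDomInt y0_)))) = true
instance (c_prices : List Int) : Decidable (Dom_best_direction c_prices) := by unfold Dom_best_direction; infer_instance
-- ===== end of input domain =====

-- B replaces A's nested pair enumeration (two buckets, compare) by one prefix-sum sweep
-- deciding LONG by the sign of the net signed delta; objective: faster (constant factor).


-- ===== PORT A =====
-- state (total_bearish, total_bullish); indices in the loop are always in range,
-- so c_prices[i] is ported with the total pyGetD (exact here).
def best_direction (c_prices : List Int) : Int :=
  let st :=
    (PySem.List.pyRange 0 5 1).foldl (fun (st : Int × Int) first =>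
      (PySem.List.pyRange first (PySem.List.len c_prices) 1).foldl (fun (st : Int × Int) last =>
        if first = last then st
        else
          let c1 := PySem.List.pyGetD c_prices first 0
          let c2 := PySem.List.pyGetD c_prices last 0
          let delta := c2 - c1
          if delta > 0 then (st.1, st.2 + delta)
          else if delta < 0 then (st.1 + |delta|, st.2)
          else st) st)
      ((0 : Int), (0 : Int))
  if st.2 > st.1 then 1 else 0

-- ===== PORT B =====
-- state (prefix, net)
def best_direction_alt (c_prices : List Int) : Int :=
  let n := PySem.List.len c_prices
  let total := c_prices.sum
  let st :=
    (PySem.List.pyRange 0 (min 5 n) 1).foldl (fun (st : Int × Int) first =>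
      let p := PySem.List.pyGetD c_prices first 0
      let pfx := st.1 + p
      (pfx, st.2 + ((total - pfx) - (n - 1 - first) * p)))
      ((0 : Int), (0 : Int))
  if st.2 > 0 then 1 else 0

-- ===== PRECONDITION & SPEC =====
def Spec_best_direction (c_prices : List Int) (out : Int) : Prop := out = best_direction_alt c_prices
instance (c_prices : List Int) (out : Int) : Decidable (Spec_best_direction c_prices out) := by unfold Spec_best_direction; infer_instance

-- ===== CLAIM (what is proved, stated in full; the proofs are below) =====
def Claim_equal_best_direction : Prop := ∀ (c_prices : List Int), Dom_best_direction c_prices → Spec_best_direction c_prices (best_direction c_prices)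

-- ===== LEMMAS AND PROOFS =====

-- f xs i = xs[i] (total form, used only at in-range indices)
def pvF (xs : List Int) (i : Int) : Int := PySem.List.pyGetD xs i 0

-- prefix sum of pvF over [0, a)
def pvP (xs : List Int) (a : Int) : Int :=
  ((PySem.List.pyRange 0 a 1).map (pvF xs)).sum

-- A's inner loop moves the difference bullish - bearish by the signed delta.
theorem pvA_inner (xs : List Int) (first : Int) (L : List Int) (st : Int × Int) :
    ((L.foldl (fun (st : Int × Int) last =>
        if first = last then st
        else
          let c1 := PySem.List.pyGetD xs first 0
          let c2 := PySem.List.pyGetD xs last 0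
          let delta := c2 - c1
          if delta > 0 then (st.1, st.2 + delta)
          else if delta < 0 then (st.1 + |delta|, st.2)
          else st) st).2
     - (L.foldl (fun (st : Int × Int) last =>
        if first = last then st
        else
          let c1 := PySem.List.pyGetD xs first 0
          let c2 := PySem.List.pyGetD xs last 0
          let delta := c2 - c1
          if delta > 0 then (st.1, st.2 + delta)
          else if delta < 0 then (st.1 + |delta|, st.2)
          else st) st).1)
    = st.2 - st.1 + (L.map (fun last => pvF xs last - pvF xs first)).sum := by
  induction L generalizing st with
  | nil => simp
  | cons x t ih =>
    rw [List.foldl_cons, ih]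
    simp only [List.map_cons, List.sum_cons, pvF]
    by_cases h1 : first = x
    · subst h1; simp
    · simp only [if_neg h1]
      by_cases h2 : PySem.List.pyGetD xs x 0 - PySem.List.pyGetD xs first 0 > 0
      · simp only [if_pos h2]; ring
      · simp only [if_neg h2]
        by_cases h3 : PySem.List.pyGetD xs x 0 - PySem.List.pyGetD xs first 0 < 0
        · simp only [if_pos h3, abs_of_neg h3]; ring
        · simp only [if_neg h3]
          have h0 : PySem.List.pyGetD xs x 0 - PySem.List.pyGetD xs first 0 = 0 := by omega
          rw [h0]; ring

-- A's double loop: bullish - bearish = net signed delta over all pairs.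
theorem pvA_outer (xs : List Int) (R : List Int) (st : Int × Int) :
    ((R.foldl (fun (st : Int × Int) first =>
        (PySem.List.pyRange first (PySem.List.len xs) 1).foldl (fun (st : Int × Int) last =>
          if first = last then st
          else
            let c1 := PySem.List.pyGetD xs first 0
            let c2 := PySem.List.pyGetD xs last 0
            let delta := c2 - c1
            if delta > 0 then (st.1, st.2 + delta)
            else if delta < 0 then (st.1 + |delta|, st.2)
            else st) st) st).2
     - (R.foldl (fun (st : Int × Int) first =>
        (PySem.List.pyRange first (PySem.List.len xs) 1).foldl (fun (st : Int × Int) last =>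
          if first = last then st
          else
            let c1 := PySem.List.pyGetD xs first 0
            let c2 := PySem.List.pyGetD xs last 0
            let delta := c2 - c1
            if delta > 0 then (st.1, st.2 + delta)
            else if delta < 0 then (st.1 + |delta|, st.2)
            else st) st) st).1)
    = st.2 - st.1
      + (R.map (fun first =>
          ((PySem.List.pyRange first (PySem.List.len xs) 1).map
            (fun last => pvF xs last - pvF xs first)).sum)).sum := by
  induction R generalizing st with
  | nil => simp
  | cons x t ih =>
    simp only [List.foldl_cons, List.map_cons, List.sum_cons]
    rw [ih, pvA_inner]
    ring

-- the per-first closed-form term B accumulates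
def pvTerm (xs : List Int) (first : Int) : Int :=
  (xs.sum - pvP xs (first + 1)) - ((PySem.List.len xs) - 1 - first) * pvF xs first

-- B's fold unfolds to (final prefix, s + accumulated terms); we prove the accumulated
-- part equals the mapped pvTerm sum when the loop runs over pyRange a b 1 with the
-- correct starting prefix pvP xs a.
theorem pvB_fold (xs : List Int) (m : Nat) : ∀ (a s : Int), 0 ≤ a →
    ((PySem.List.pyRange a (a + (m : Int)) 1).foldl (fun (st : Int × Int) first =>
        (st.1 + PySem.List.pyGetD xs first 0,
          st.2 + (xs.sum - (st.1 + PySem.List.pyGetD xs first 0)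
            - (PySem.List.len xs - 1 - first) * PySem.List.pyGetD xs first 0)))
      (pvP xs a, s)).2
    = s + ((PySem.List.pyRange a (a + (m : Int)) 1).map (pvTerm xs)).sum := by
  induction m with
  | zero =>
    intro a s _
    rw [show a + ((0 : Nat) : Int) = a by ring, PySem.List.pyRange_one_eq_nil (le_refl a)]
    simp
  | succ m ih =>
    intro a s h0
    have hsh : a + ((m + 1 : Nat) : Int) = (a + 1) + (m : Int) := by push_cast; ring
    rw [hsh, PySem.List.pyRange_one_cons (by omega)]
    rw [List.foldl_cons]
    simp only [List.map_cons, List.sum_cons]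
    have hP : pvP xs a + PySem.List.pyGetD xs a 0 = pvP xs (a + 1) := by
      unfold pvP
      rw [PySem.List.pyRange_one_succ_right (by omega)]
      simp [pvF]
    rw [hP, ih (a + 1) _ (by omega)]
    simp only [pvTerm, pvF]
    ring

-- the inner signed-delta sum has the closed form pvTerm, for 0 ≤ first < len
theorem pvInner_closed (xs : List Int) (first : Int) (h0 : 0 ≤ first)
    (hlt : first < PySem.List.len xs) :
    ((PySem.List.pyRange first (PySem.List.len xs) 1).map
      (fun last => pvF xs last - pvF xs first)).sum = pvTerm xs first := by
  have htot : pvP xs (PySem.List.len xs) = xs.sum := by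
    unfold pvP pvF
    exact congrArg List.sum (PySem.List.map_pyGetD_pyRange_zero xs 0)
  have hsplit : pvP xs (PySem.List.len xs)
      = pvP xs first + ((PySem.List.pyRange first (PySem.List.len xs) 1).map (pvF xs)).sum := by
    unfold pvP
    rw [PySem.List.pyRange_one_append 0 first (PySem.List.len xs) h0 (le_of_lt hlt)]
    simp
  have hP1 : pvP xs (first + 1) = pvP xs first + pvF xs first := by
    unfold pvP
    rw [PySem.List.pyRange_one_succ_right h0]
    simp
  have hlen : ((PySem.List.pyRange first (PySem.List.len xs) 1).length : Int)
      = PySem.List.len xs - first := by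
    rw [PySem.List.length_pyRange_one]; omega
  have hsum : ((PySem.List.pyRange first (PySem.List.len xs) 1).map
      (fun last => pvF xs last + (-(pvF xs first)))).sum
      = ((PySem.List.pyRange first (PySem.List.len xs) 1).map (pvF xs)).sum
        + ((PySem.List.len xs) - first) * (-(pvF xs first)) := by
    rw [PySem.List.sum_map_add_int, PySem.List.sum_map_const_int, hlen]
  have hbody : (fun last => pvF xs last - pvF xs first)
      = (fun last => pvF xs last + (-(pvF xs first))) := by
    funext last; ring
  rw [hbody, hsum]
  unfold pvTerm
  rw [hP1]
  have : ((PySem.List.pyRange first (PySem.List.len xs) 1).map (pvF xs)).sum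
      = xs.sum - pvP xs first := by omega
  rw [this]
  ring

-- A's range(5) double sum equals the pvTerm sum over range(min(5, n)):
-- terms with first ≥ n have an empty inner range and vanish.
theorem pvRange5 (xs : List Int) :
    ((PySem.List.pyRange 0 5 1).map (fun first =>
        ((PySem.List.pyRange first (PySem.List.len xs) 1).map
          (fun last => pvF xs last - pvF xs first)).sum)).sum
    = ((PySem.List.pyRange 0 (min 5 (PySem.List.len xs)) 1).map (pvTerm xs)).sum := by
  have hn0 : 0 ≤ PySem.List.len xs := by rw [PySem.List.len_eq]; omega
  have hm0 : 0 ≤ min 5 (PySem.List.len xs) := by omega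
  have hm5 : min 5 (PySem.List.len xs) ≤ 5 := by omega
  rw [PySem.List.pyRange_one_append 0 (min 5 (PySem.List.len xs)) 5 hm0 hm5]
  rw [List.map_append, List.sum_append]
  have h2 : ((PySem.List.pyRange (min 5 (PySem.List.len xs)) 5 1).map (fun first =>
      ((PySem.List.pyRange first (PySem.List.len xs) 1).map
        (fun last => pvF xs last - pvF xs first)).sum)).sum = 0 := by
    apply List.sum_eq_zero
    intro x hx
    simp only [List.mem_map] at hx
    obtain ⟨first, hmem, hx⟩ := hx
    rw [PySem.List.mem_pyRange_one] at hmem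
    rw [PySem.List.pyRange_one_eq_nil (by omega)] at hx
    simpa using hx.symm
  rw [h2, add_zero]
  apply congrArg List.sum
  apply List.map_congr_left
  intro first hmem
  rw [PySem.List.mem_pyRange_one] at hmem
  exact pvInner_closed xs first hmem.1 (by omega)

-- ===== VERDICT (by name: the statement is the Claim_ definition above) =====
theorem best_direction_spec : Claim_equal_best_direction := by
  intro xs _
  unfold Spec_best_direction best_direction best_direction_alt
  have hn0 : 0 ≤ PySem.List.len xs := by rw [PySem.List.len_eq]; omega
  have hA := pvA_outer xs (PySem.List.pyRange 0 5 1) ((0 : Int), (0 : Int))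
  have hpv0 : pvP xs 0 = 0 := by
    simp [pvP, PySem.List.pyRange_one_eq_nil (le_refl (0 : Int))]
  have hB := pvB_fold xs (min 5 (PySem.List.len xs)).toNat 0 0 le_rfl
  rw [hpv0, show (0 : Int) + (((min 5 (PySem.List.len xs)).toNat : Nat) : Int)
      = min 5 (PySem.List.len xs) by omega] at hB
  rw [pvRange5] at hA
  set X := (PySem.List.pyRange 0 5 1).foldl (fun (st : Int × Int) first =>
      (PySem.List.pyRange first (PySem.List.len xs) 1).foldl (fun (st : Int × Int) last =>
        if first = last then st
        else
          let c1 := PySem.List.pyGetD xs first 0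
          let c2 := PySem.List.pyGetD xs last 0
          let delta := c2 - c1
          if delta > 0 then (st.1, st.2 + delta)
          else if delta < 0 then (st.1 + |delta|, st.2)
          else st) st) ((0 : Int), (0 : Int)) with hX
  set Y := (PySem.List.pyRange 0 (min 5 (PySem.List.len xs)) 1).foldl (fun (st : Int × Int) first =>
      (st.1 + PySem.List.pyGetD xs first 0,
        st.2 + (xs.sum - (st.1 + PySem.List.pyGetD xs first 0)
          - (PySem.List.len xs - 1 - first) * PySem.List.pyGetD xs first 0))) ((0 : Int), (0 : Int)) with hY
  show (if X.2 > X.1 then (1 : Int) else 0) = (if Y.2 > 0 then (1 : Int) else 0)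
  have hiff : X.2 > X.1 ↔ Y.2 > 0 := by omega
  by_cases h1 : X.2 > X.1
  · rw [if_pos h1, if_pos (hiff.mp h1)]
  · rw [if_neg h1, if_neg (fun h => h1 (hiff.mpr h))]
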